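-- pv_equiv track=rewrite | github.com/ParkHoH/Algorithm_test | programmers/LV_2/멀쩡한 사각형.py | solution
-- ===== SOURCE A (Python) =====
-- def solution(w,h):
--     if w == h:
--         return w * h - w
--     w_set = set()
--     h_set = set()
--     for i in range(1, w+1):
--         if w%i == 0:
--             w_set.add(i)
--     for i in range(1, h+1):
--         if h%i == 0:
--             h_set.add(i)
--
--     gcd = max(w_set.intersection(h_set))
--     return w * h - (w + h - gcd)
-- ===== SOURCE B (Python) =====
-- def solution(w, h):
--     # Euclidean algorithm instead of enumerating all divisors of w and h.
--     a, b = w, h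
--     while b:
--         a, b = b, a % b
--     return w * h - (w + h - a)
-- ===== Notes on version B (the rewrite author's own statement) =====
-- stated objective: faster
-- what changed: B computes the gcd with the Euclidean algorithm instead of enumerating every divisor of w and of h and taking the maximum of the intersection of the two divisor sets.
import Mathlib
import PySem

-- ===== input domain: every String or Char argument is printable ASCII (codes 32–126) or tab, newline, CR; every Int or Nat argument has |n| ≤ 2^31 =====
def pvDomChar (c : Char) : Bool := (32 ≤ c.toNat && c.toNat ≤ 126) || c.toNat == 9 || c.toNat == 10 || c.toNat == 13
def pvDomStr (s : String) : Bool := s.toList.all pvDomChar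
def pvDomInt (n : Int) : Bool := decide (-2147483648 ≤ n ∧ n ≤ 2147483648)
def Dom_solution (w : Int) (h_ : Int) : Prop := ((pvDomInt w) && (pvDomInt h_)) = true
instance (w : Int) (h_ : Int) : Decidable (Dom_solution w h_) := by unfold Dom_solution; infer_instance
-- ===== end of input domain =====

-- B replaces A's divisor-set enumeration of the gcd by the Euclidean algorithm (objective: faster).

-- ===== PORT A =====
def solution (w : Int) (h_ : Int) : Int :=
  if w == h_ then w * h_ - w
  else
    let w_set : PySem.Set Int := (PySem.List.pyRange 1 (w+1) 1).foldl
      (fun s i => if PySem.Int.mod w i == 0 then PySem.Set.add s i else s) PySem.Set.empty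
    let h_set : PySem.Set Int := (PySem.List.pyRange 1 (h_+1) 1).foldl
      (fun s i => if PySem.Int.mod h_ i == 0 then PySem.Set.add s i else s) PySem.Set.empty
    -- max(set) depends only on the set's members, not on Python's hash order
    let gcd : Int := (PySem.List.max? (PySem.Set.inter w_set h_set) (fun x => x)).getD 0
    w * h_ - (w + h_ - gcd)

-- ===== PORT B =====
-- termination fact for the Euclidean loop (the port cites it in decreasing_by)
theorem pvModNatAbsLt (a b : Int) (hb : b ≠ 0) :
    (PySem.Int.mod a b).natAbs < b.natAbs := by
  rcases lt_or_gt_of_ne hb with hneg | hpos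
  · have h1 := PySem.Int.mod_neg_bounds a hneg
    omega
  · have h1 := PySem.Int.mod_nonneg a hpos
    have h2 := PySem.Int.mod_lt a hpos
    omega

-- the 'while b: a, b = b, a % b' loop of Source B
def gcdLoop (a b : Int) : Int :=
  if _hb : b = 0 then a else gcdLoop b (PySem.Int.mod a b)
termination_by b.natAbs
decreasing_by exact pvModNatAbsLt a b _hb

def solution_alt (w : Int) (h_ : Int) : Int :=
  w * h_ - (w + h_ - gcdLoop w h_)

-- ===== PRECONDITION & SPEC =====
-- Pre_ is exactly where A returns: elsewhere (w ≠ h with a side < 1) max() of the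
-- empty divisor intersection raises ValueError.
def Pre_solution (w : Int) (h_ : Int) : Prop := w = h_ ∨ (1 ≤ w ∧ 1 ≤ h_)
instance (w : Int) (h_ : Int) : Decidable (Pre_solution w h_) := by unfold Pre_solution; infer_instance
def pvWitness_solution : Int × Int := (4, 6)

def Spec_solution (w : Int) (h_ : Int) (out : Int) : Prop := out = solution_alt w h_
instance (w : Int) (h_ : Int) (out : Int) : Decidable (Spec_solution w h_ out) := by unfold Spec_solution; infer_instance

-- ===== CLAIM (what is proved, stated in full; the proofs are below) =====
def Claim_equal_solution : Prop := ∀ (w : Int) (h_ : Int), Dom_solution w h_ → Pre_solution w h_ → Spec_solution w h_ (solution w h_)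

-- ===== LEMMAS AND PROOFS =====

-- one Euclidean step preserves the gcd
theorem gcd_emod_step (a b : Int) : Int.gcd b (a % b) = Int.gcd a b := by
  have ha : a % b + a / b * b = a := by rw [mul_comm]; exact Int.emod_add_mul_ediv a b
  rw [Int.gcd_comm a b]
  conv_rhs => rw [← ha]
  exact (Int.gcd_add_mul_right_right b (a % b) (a / b)).symm

-- the Euclidean loop computes Int.gcd on nonnegative inputs
theorem gcdLoop_eq_gcd (b a : Int) (hb : 0 ≤ b) (ha : 0 ≤ a) :
    gcdLoop a b = (Int.gcd a b : Int) := by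
  by_cases h : b = 0
  · subst h
    rw [gcdLoop]
    norm_num [Int.gcd_zero_right]
    simp [abs_of_nonneg ha]
  · have hbpos : 0 < b := lt_of_le_of_ne hb (Ne.symm h)
    rw [gcdLoop]
    simp only [h, dite_false]
    have hrec := gcdLoop_eq_gcd (PySem.Int.mod a b) b (PySem.Int.mod_nonneg a hbpos) hb
    rw [hrec, PySem.Int.mod_eq_emod_of_pos hbpos, gcd_emod_step]
termination_by b.natAbs
decreasing_by exact pvModNatAbsLt a b h

-- membership in a divisor set built by A's filtered fold
theorem mem_divFold (n : Int) (l : List Int) (s : PySem.Set Int) (x : Int) :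
    x ∈ l.foldl (fun s i => if PySem.Int.mod n i == 0 then PySem.Set.add s i else s) s ↔
      x ∈ s ∨ (x ∈ l ∧ PySem.Int.mod n x = 0) := by
  induction l generalizing s with
  | nil => simp
  | cons i t ih =>
    simp only [List.foldl_cons]
    by_cases hc : PySem.Int.mod n i = 0
    · have hcc : (PySem.Int.mod n i == 0) = true := by simpa using hc
      simp only [hcc, if_true, ih, PySem.Set.mem_add, List.mem_cons]
      constructor
      · rintro ((hx | rfl) | ⟨hx, hm⟩)
        · exact Or.inl hx
        · exact Or.inr ⟨Or.inl rfl, hc⟩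
        · exact Or.inr ⟨Or.inr hx, hm⟩
      · rintro (hx | ⟨(rfl | hx), hm⟩)
        · exact Or.inl (Or.inl hx)
        · exact Or.inl (Or.inr rfl)
        · exact Or.inr ⟨hx, hm⟩
    · have hcc : (PySem.Int.mod n i == 0) = false := by simpa using hc
      simp only [hcc, Bool.false_eq_true, if_false, ih, List.mem_cons]
      constructor
      · rintro (hx | ⟨hx, hm⟩)
        · exact Or.inl hx
        · exact Or.inr ⟨Or.inr hx, hm⟩
      · rintro (hx | ⟨(rfl | hx), hm⟩)
        · exact Or.inl hx
        · exact absurd hm hc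
        · exact Or.inr ⟨hx, hm⟩

-- the maximum of any list of exactly the common divisors is the gcd
theorem max_common_divisors (w h_ : Int) (hw : 1 ≤ w) (I : List Int)
    (hI : ∀ x : Int, x ∈ I ↔ (0 < x ∧ x ∣ w ∧ x ∣ h_)) :
    (PySem.List.max? I (fun x => x)).getD 0 = (Int.gcd w h_ : Int) := by
  have hgpos : (0 : Int) < (Int.gcd w h_ : Int) := by
    exact_mod_cast Int.gcd_pos_of_ne_zero_left h_ (by omega : w ≠ 0)
  have hgmem : ((Int.gcd w h_ : Int)) ∈ I :=
    (hI _).2 ⟨hgpos, Int.gcd_dvd_left w h_, Int.gcd_dvd_right w h_⟩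
  have hne : I ≠ [] := fun hnil => by simp [hnil] at hgmem
  obtain ⟨m, hm⟩ : ∃ m, PySem.List.max? I (fun x => x) = some m := by
    cases hmax : PySem.List.max? I (fun x => x) with
    | none => exact absurd ((PySem.List.max?_eq_none_iff I (fun x => x)).1 hmax) hne
    | some m => exact ⟨m, rfl⟩
  have hmmem := PySem.List.max?_mem hm
  have hmax1 := PySem.List.max?_isMax hm
  obtain ⟨hmpos, hmw, hmh⟩ := (hI m).1 hmmem
  have hmle : m ≤ (Int.gcd w h_ : Int) := by
    have hm' : (m.toNat : Int) = m := Int.toNat_of_nonneg (le_of_lt hmpos)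
    have hd : (m.toNat : Int) ∣ (Int.gcd w h_ : Int) :=
      Int.natCast_dvd_natCast.mpr (Int.dvd_gcd (hm' ▸ hmw) (hm' ▸ hmh))
    rw [hm'] at hd
    exact Int.le_of_dvd hgpos hd
  have hgle : (Int.gcd w h_ : Int) ≤ m := hmax1 _ hgmem
  rw [hm, Option.getD_some]
  omega

theorem solution_eq_alt (w h_ : Int) (hp : Pre_solution w h_) :
    solution w h_ = solution_alt w h_ := by
  by_cases hwh : w = h_
  · subst hwh
    have gww : gcdLoop w w = w := by
      by_cases hw0 : w = 0
      · subst hw0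
        rw [gcdLoop]
        norm_num
      · have hmod : PySem.Int.mod w w = 0 := (PySem.Int.mod_eq_zero_iff_dvd w w).2 dvd_rfl
        rw [gcdLoop]
        simp only [hw0, dite_false, hmod]
        rw [gcdLoop]
        norm_num
    simp only [solution, solution_alt, beq_self_eq_true, if_true, gww]
    ring
  · rcases hp with rfl | ⟨hw, hh⟩
    · exact absurd rfl hwh
    have hfalse : (w == h_) = false := by simpa using hwh
    simp only [solution, solution_alt, hfalse, Bool.false_eq_true, if_false]
    have hE : ∀ x : Int,
        x ∈ PySem.Set.inter
          ((PySem.List.pyRange 1 (w+1) 1).foldl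
            (fun s i => if PySem.Int.mod w i == 0 then PySem.Set.add s i else s) PySem.Set.empty)
          ((PySem.List.pyRange 1 (h_+1) 1).foldl
            (fun s i => if PySem.Int.mod h_ i == 0 then PySem.Set.add s i else s) PySem.Set.empty)
        ↔ (0 < x ∧ x ∣ w ∧ x ∣ h_) := by
      intro x
      rw [PySem.Set.mem_inter, mem_divFold, mem_divFold]
      simp only [PySem.Set.empty, List.not_mem_nil, false_or,
        PySem.List.mem_pyRange_one, PySem.Int.mod_eq_zero_iff_dvd]
      constructor
      · rintro ⟨⟨⟨h1, _⟩, hdw⟩, ⟨_, hdh⟩⟩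
        exact ⟨by omega, hdw, hdh⟩
      · rintro ⟨hx, hdw, hdh⟩
        have hxw : x ≤ w := Int.le_of_dvd (by omega) hdw
        have hxh : x ≤ h_ := Int.le_of_dvd (by omega) hdh
        exact ⟨⟨⟨by omega, by omega⟩, hdw⟩, ⟨⟨by omega, by omega⟩, hdh⟩⟩
    rw [max_common_divisors w h_ hw _ hE,
      gcdLoop_eq_gcd h_ w (by omega) (by omega)]

-- ===== VERDICT (by name: the statement is the Claim_ definition above) =====
theorem solution_spec : Claim_equal_solution := by
  intro w h_ _ hp
  unfold Spec_solution
  exact solution_eq_alt w h_ hp
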